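-- pv_equiv track=rewrite | github.com/Fruitful-Network-Development/mycite-core | instances/_shared/runtime/flavors/fnd/portal/api/newsletter_admin.py | _normalized_email
-- ===== SOURCE A (Python) =====
-- def _text(value: object) -> str:
--     return "" if value is None else str(value).strip()
--
-- def _normalized_email(value: object) -> str:
--     token = _text(value).lower()
--     if not token or any(ch.isspace() for ch in token):
--         return ""
--     if token.count("@") != 1:
--         return ""
--     local_part, domain_part = token.split("@", 1)
--     if not local_part or not domain_part or "." not in domain_part:
--         return ""
--     return token
-- ===== SOURCE B (Python) =====
-- def _text(value: object) -> str:
--     return "" if value is None else str(value).strip()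
--
-- def _normalized_email(value: object) -> str:
--     token = _text(value).lower()
--     ats = local_len = domain_len = 0
--     dot = ws = False
--     for ch in token:
--         if ch.isspace():
--             ws = True
--         elif ch == "@":
--             ats += 1
--         elif ats == 0:
--             local_len += 1
--         else:
--             if ats == 1 and ch == ".":
--                 dot = True
--             domain_len += 1
--     if not ws and ats == 1 and local_len and domain_len and dot:
--         return token
--     return ""
-- ===== Notes on version B (the rewrite author's own statement) =====
-- stated objective: alternative
-- what changed: Replaced the multi-pass pipeline (whitespace any-scan, at-sign count, two-way split, dot-membership test on the domain) by a single left-to-right scan that accumulates the at-sign count, local-part length, domain length, dot-seen and whitespace-seen flags in one pass.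
import Mathlib
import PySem

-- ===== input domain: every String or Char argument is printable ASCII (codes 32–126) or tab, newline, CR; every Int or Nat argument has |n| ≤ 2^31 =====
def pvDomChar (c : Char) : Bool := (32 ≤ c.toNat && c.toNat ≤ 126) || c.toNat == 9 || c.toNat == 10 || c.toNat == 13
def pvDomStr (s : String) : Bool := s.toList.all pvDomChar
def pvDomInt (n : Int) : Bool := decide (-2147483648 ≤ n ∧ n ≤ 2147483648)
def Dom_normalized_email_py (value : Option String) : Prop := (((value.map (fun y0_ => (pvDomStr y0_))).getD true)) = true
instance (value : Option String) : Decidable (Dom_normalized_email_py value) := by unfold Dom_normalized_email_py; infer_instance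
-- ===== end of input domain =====

-- ===== PORT A =====
-- B replaces A's several scans (whitespace any-scan, at-sign count, two-way split,
-- dot-membership test) by one left-to-right scan accumulating counters; same return value.

-- helper: Python _text (value is None -> "" else str(value).strip())
def pyText (value : Option String) : String :=
  match value with
  | none => ""
  | some s => PySem.Str.strip s

def normalized_email_py (value : Option String) : String :=
  let token := PySem.Str.lower (pyText value)
  if PySem.Str.len token == 0 || token.toList.any PySem.Str.isspace then ""
  else if PySem.Str.count token "@" != 1 then ""
  else
    match PySem.Str.splitMax? token "@" 1 with
    | some [local_part, domain_part] =>
        if PySem.Str.len local_part == 0 || PySem.Str.len domain_part == 0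
            || !(PySem.Str.isIn "." domain_part) then ""
        else token
    | _ => ""   -- unreachable totality guard: count('@') = 1 always yields exactly two parts

-- ===== PORT B =====
-- one step of B's single scan; state = (ats, local_len, domain_len, dot, ws)
def altScan (s : Int × Int × Int × Bool × Bool) (ch : Char) : Int × Int × Int × Bool × Bool :=
  match s with
  | (ats, llen, dlen, dot, ws) =>
    if PySem.Str.isspace ch then (ats, llen, dlen, dot, true)
    else if ch == '@' then (ats + 1, llen, dlen, dot, ws)
    else if ats == 0 then (ats, llen + 1, dlen, dot, ws)
    else (ats, llen, dlen + 1, dot || (ats == 1 && ch == '.'), ws)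

def normalized_email_py_alt (value : Option String) : String :=
  let token := PySem.Str.lower (match value with | none => "" | some s => PySem.Str.strip s)
  match token.toList.foldl altScan (0, 0, 0, false, false) with
  | (ats, llen, dlen, dot, ws) =>
    if !ws && ats == 1 && llen > 0 && dlen > 0 && dot then token else ""

-- ===== PRECONDITION & SPEC =====
def Spec_normalized_email_py (value : Option String) (out : String) : Prop := out = normalized_email_py_alt value
instance (value : Option String) (out : String) : Decidable (Spec_normalized_email_py value out) := by unfold Spec_normalized_email_py; infer_instance

-- ===== CLAIM (what is proved, stated in full; the proofs are below) =====
def Claim_equal_normalized_email_py : Prop := ∀ (value : Option String), Dom_normalized_email_py value → Spec_normalized_email_py value (normalized_email_py value)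

-- ===== LEMMAS AND PROOFS =====

theorem scan_ws (cs : List Char) (s : Int × Int × Int × Bool × Bool) :
    (cs.foldl altScan s).2.2.2.2 = (s.2.2.2.2 || cs.any PySem.Chars.isspace) := by
  induction cs generalizing s with
  | nil => simp
  | cons c t ih =>
    obtain ⟨a,l,d,dot,w⟩ := s
    simp only [List.foldl_cons, List.any_cons, ih]
    by_cases hs : PySem.Chars.isspace c
    · simp [altScan, PySem.Str.isspace, hs]
    · simp only [altScan, PySem.Str.isspace, hs, if_false, Bool.false_or]
      split_ifs <;> simp_all [Bool.or_left_comm]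

theorem scan_ats (cs : List Char) (h : ∀ c ∈ cs, PySem.Chars.isspace c = false)
    (a l d : Int) (dot w : Bool) :
    (cs.foldl altScan (a, l, d, dot, w)).1 = a + (cs.count '@' : Int) := by
  induction cs generalizing a l d dot w with
  | nil => simp
  | cons c t ih =>
    have hc := h c (by simp)
    have ht : ∀ c ∈ t, PySem.Chars.isspace c = false := fun x hx => h x (by simp [hx])
    simp only [List.foldl_cons, altScan, PySem.Str.isspace, hc, if_false]
    by_cases he : c = '@'
    · simp only [he, beq_self_eq_true, if_true, ih ht, List.count_cons, beq_self_eq_true]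
      simp; omega
    · rw [if_neg (by simp [he])]
      split_ifs <;> simp_all [ih ht, List.count_cons]

theorem scan_phase0 (cs : List Char) (h : ∀ c ∈ cs, PySem.Chars.isspace c = false ∧ c ≠ '@')
    (l d : Int) (dot w : Bool) :
    cs.foldl altScan (0, l, d, dot, w) = (0, l + (cs.length : Int), d, dot, w) := by
  induction cs generalizing l with
  | nil => simp
  | cons c t ih =>
    obtain ⟨hc1, hc2⟩ := h c (by simp)
    have ht : ∀ c ∈ t, PySem.Chars.isspace c = false ∧ c ≠ '@' := fun x hx => h x (by simp [hx])
    simp only [List.foldl_cons, altScan, PySem.Str.isspace, hc1]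
    rw [if_neg (by simp), if_neg (by simp [hc2]), if_pos (by decide), ih ht]
    simp
    omega

theorem scan_phase1 (cs : List Char) (h : ∀ c ∈ cs, PySem.Chars.isspace c = false ∧ c ≠ '@')
    (l d : Int) (dot w : Bool) :
    cs.foldl altScan (1, l, d, dot, w) = (1, l, d + (cs.length : Int), dot || decide ('.' ∈ cs), w) := by
  induction cs generalizing d dot with
  | nil => simp
  | cons c t ih =>
    obtain ⟨hc1, hc2⟩ := h c (by simp)
    have ht : ∀ c ∈ t, PySem.Chars.isspace c = false ∧ c ≠ '@' := fun x hx => h x (by simp [hx])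
    simp only [List.foldl_cons, altScan, PySem.Str.isspace, hc1]
    rw [if_neg (by simp), if_neg (by simp [hc2]), if_neg (by decide), ih ht]
    by_cases hd : c = '.'
    · simp [hd]
      omega
    · have hcd : (c == '.') = false := by simp [hd]
      simp [hcd, Ne.symm hd]
      omega


theorem count_go_single (c : Char) (cs : List Char) (fuel acc : Nat) (h : cs.length ≤ fuel) :
    PySem.Chars.count.go [c] fuel cs acc = acc + cs.count c := by
  induction cs generalizing fuel acc with
  | nil => cases fuel <;> simp [PySem.Chars.count.go]
  | cons x t ih =>
    cases fuel with
    | zero => simp at h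
    | succ fuel =>
      have hf : t.length ≤ fuel := by simp at h; omega
      by_cases hx : c = x
      · subst hx
        simp [PySem.Chars.count.go, List.isPrefixOf, ih _ _ hf, List.count_cons]
        omega
      · have : ([c].isPrefixOf (x::t)) = false := by simp [List.isPrefixOf, hx]
        simp [PySem.Chars.count.go, this, ih _ _ hf, List.count_cons, Ne.symm hx, hx]

theorem count_single (c : Char) (cs : List Char) :
    PySem.Chars.count cs [c] = cs.count c := by
  rw [PySem.Chars.count.eq_def]
  simp only [List.isEmpty_cons, if_false, Bool.false_eq_true]
  rw [count_go_single c cs cs.length 0 (Nat.le_refl _)]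
  simp

theorem split_go_zero (c : Char) (cs : List Char) (fuel : Nat) (acc : List (List Char)) :
    PySem.Chars.splitOnMax.go [c] fuel 0 cs [] acc = (cs :: acc).reverse := by
  cases cs <;> cases fuel <;> simp [PySem.Chars.splitOnMax.go]

theorem split_go_one (c : Char) (cs : List Char) (fuel : Nat) (h : cs.length ≤ fuel)
    (cur : List Char) (acc : List (List Char)) :
    PySem.Chars.splitOnMax.go [c] fuel 1 cs cur acc =
      (if c ∈ cs then
        ((cs.drop ((cs.takeWhile (fun x => x != c)).length + 1)) :: (cur.reverse ++ cs.takeWhile (fun x => x != c)) :: acc).reverse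
       else ((cur.reverse ++ cs) :: acc).reverse) := by
  induction cs generalizing fuel cur acc with
  | nil => cases fuel <;> simp [PySem.Chars.splitOnMax.go]
  | cons x t ih =>
    cases fuel with
    | zero => simp at h
    | succ fuel =>
      have hf : t.length ≤ fuel := by simp at h; omega
      by_cases hx : c = x
      · have hpre : ([c].isPrefixOf (x::t)) = true := by simp [List.isPrefixOf, hx]
        simp only [PySem.Chars.splitOnMax.go, hpre]
        rw [if_neg (by omega)]
        simp [split_go_zero, hx, List.takeWhile_cons]
      · have hpre : ([c].isPrefixOf (x::t)) = false := by simp [List.isPrefixOf, hx]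
        simp only [PySem.Chars.splitOnMax.go, hpre]
        rw [if_neg (by omega)]
        rw [ih fuel hf (x :: cur) acc]
        have hxc : (x != c) = true := by simp [Ne.symm hx]
        simp [hxc, List.takeWhile_cons, List.drop_succ_cons, List.mem_cons,
          List.reverse_cons, List.append_assoc]
        simp [hx]

theorem singleton_infix (c : Char) (cs : List Char) : [c] <:+: cs ↔ c ∈ cs := by
  constructor
  · intro hi; exact hi.subset (by simp)
  · intro hm
    obtain ⟨l, r, rfl⟩ := List.append_of_mem hm
    exact ⟨l, r, by simp⟩

theorem count_one_decomp (c : Char) (cs : List Char) (h : cs.count c = 1) :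
    cs = cs.takeWhile (fun x => x != c) ++ c :: cs.drop ((cs.takeWhile (fun x => x != c)).length + 1) ∧
    c ∉ cs.takeWhile (fun x => x != c) ∧ c ∉ cs.drop ((cs.takeWhile (fun x => x != c)).length + 1) := by
  induction cs with
  | nil => simp at h
  | cons x t ih =>
    by_cases hx : c = x
    · subst hx
      simp only [List.takeWhile_cons, bne_self_eq_false, List.drop_succ_cons]
      have ht : t.count c = 0 := by simp [List.count_cons] at h; omega
      simp [List.drop_zero, List.count_eq_zero.mp ht]
    · have hxc : (x != c) = true := by simp [Ne.symm hx]
      have ht : t.count c = 1 := by simp [List.count_cons, Ne.symm hx] at h; omega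
      obtain ⟨h1, h2, h3⟩ := ih ht
      simp only [List.takeWhile_cons, hxc, if_true, List.length_cons, List.drop_succ_cons]
      refine ⟨?_, ?_, h3⟩
      · simp only [List.cons_append, List.cons.injEq, true_and]
        exact h1
      · simp only [List.mem_cons, not_or]
        exact ⟨hx, h2⟩

theorem core_eq (token : String) :
    (if PySem.Str.len token == 0 || token.toList.any PySem.Str.isspace then ""
     else if PySem.Str.count token "@" != 1 then ""
     else
       match PySem.Str.splitMax? token "@" 1 with
       | some [local_part, domain_part] =>
           if PySem.Str.len local_part == 0 || PySem.Str.len domain_part == 0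
               || !(PySem.Str.isIn "." domain_part) then ""
           else token
       | _ => "") =
    (match token.toList.foldl altScan (0, 0, 0, false, false) with
     | (ats, llen, dlen, dot, ws) =>
       if !ws && ats == 1 && llen > 0 && dlen > 0 && dot then token else "") := by
  rcases hfold : token.toList.foldl altScan (0, 0, 0, false, false) with ⟨a, l, d, dot, w⟩
  have hws := scan_ws token.toList (0, 0, 0, false, false)
  rw [hfold] at hws
  by_cases hany : token.toList.any PySem.Chars.isspace
  · simp only [hany, Bool.false_or] at hws
    rw [if_pos (by simp [PySem.Str.isspace, hany])]
    simp [hws]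
  · have hclean : ∀ c ∈ token.toList, PySem.Chars.isspace c = false := by
      intro c hc
      by_contra hcc
      exact hany (List.any_eq_true.mpr ⟨c, hc, by simpa using hcc⟩)
    simp only [hany, Bool.or_false] at hws
    have hcount : PySem.Str.count token "@" = token.toList.count '@' := by
      rw [PySem.Str.count_eq]
      have h1 : ("@" : String).toList = ['@'] := by decide
      rw [h1, count_single]
    have hat : ("@" : String).toList = ['@'] := by decide
    have hdotl : ("." : String).toList = ['.'] := by decide
    have ha := scan_ats token.toList hclean 0 0 0 false false
    rw [hfold] at ha
    simp only [zero_add] at ha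
    by_cases hcnt : token.toList.count '@' = 1
    · -- exactly one '@'
      obtain ⟨hdec, hpre, hpost⟩ := count_one_decomp '@' token.toList hcnt
      set pre := token.toList.takeWhile (fun x => x != '@') with hpredef
      set post := token.toList.drop (pre.length + 1) with hpostdef
      have hlen0 : token.toList.length ≠ 0 := by
        intro h0
        rw [List.length_eq_zero_iff.mp h0] at hcnt
        simp at hcnt
      rw [if_neg (by
            simp [PySem.Str.isspace, hany, PySem.Str.len_eq, Int.natCast_eq_zero]
            exact fun h => hlen0 (by rw [h]; rfl)),
          if_neg (by simp [count_single, hcnt])]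
      have hsplit : PySem.Str.splitMax? token "@" 1 =
          some [String.ofList pre, String.ofList post] := by
        rw [PySem.Str.splitMax?]
        rw [hat, PySem.Chars.splitMax?]
        simp only [List.isEmpty_cons, Bool.false_eq_true, if_false, PySem.Chars.splitOnMax]
        rw [if_neg (by omega)]
        have h2 : (1 : Int).toNat = 1 := by decide
        rw [h2, split_go_one '@' token.toList (token.toList.length + 1) (by omega) [] []]
        rw [if_pos (by rw [hdec]; simp)]
        simp only [Option.map_some, List.map_cons, List.map_nil, List.reverse_cons,
          List.reverse_nil, List.nil_append, List.append_nil]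
        simp
        exact ⟨rfl, rfl⟩
      rw [hsplit]
      have hcleanpre : ∀ c ∈ pre, PySem.Chars.isspace c = false ∧ c ≠ '@' := by
        intro c hc
        refine ⟨hclean c ((List.takeWhile_prefix (p := fun x => x != '@')).subset hc), ?_⟩
        intro he; subst he; exact hpre hc
      have hcleanpost : ∀ c ∈ post, PySem.Chars.isspace c = false ∧ c ≠ '@' := by
        intro c hc
        refine ⟨hclean c ?_, fun he => by subst he; exact hpost hc⟩
        rw [hpostdef] at hc; exact List.drop_subset _ _ hc
      have hfold2 : token.toList.foldl altScan (0, 0, 0, false, false) =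
          (1, (pre.length : Int), (post.length : Int), decide ('.' ∈ post), false) := by
        conv_lhs => rw [hdec]
        rw [List.foldl_append, scan_phase0 pre hcleanpre, List.foldl_cons]
        have hstep : altScan (0, (pre.length : Int), 0, false, false) '@' =
            (1, (pre.length : Int), 0, false, false) := by
          simp [altScan, PySem.Str.isspace, show PySem.Chars.isspace '@' = false from by decide]
        simp only [zero_add]
        rw [hstep, scan_phase1 post hcleanpost]
        simp
      rw [hfold] at hfold2
      simp only [Prod.mk.injEq] at hfold2
      obtain ⟨ha1, hl1, hd1, hdot1, hw1⟩ := hfold2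
      subst ha1; subst hl1; subst hd1; subst hdot1; subst hw1
      have hiin : PySem.Str.isIn "." (String.ofList post) = decide ('.' ∈ post) := by
        rw [PySem.Str.isIn_eq, hdotl]
        by_cases hm : '.' ∈ post
        · simp [hm, (PySem.Chars.isIn_iff_infix ['.'] _).mpr ((singleton_infix _ _).mpr (by simpa using hm))]
        · simp only [hm, decide_false]
          rw [← Bool.not_eq_true]
          intro hh
          exact hm (by simpa using (singleton_infix '.' post).mp ((PySem.Chars.isIn_iff_infix _ _).mp (by simpa using hh)))
      simp only [PySem.Str.len_eq, String.toList_ofList, hiin]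
      by_cases hp : pre.length = 0 <;> by_cases hq : post.length = 0 <;> by_cases hr : '.' ∈ post <;>
        simp [hp, hq, hr, Int.natCast_eq_zero] <;> omega
    · -- '@'-count differs from 1: both sides return ""
      have hnb : (a == 1) = false := by
        rw [ha]
        simp only [beq_eq_false_iff_ne, ne_eq]
        intro hcc
        exact hcnt (by exact_mod_cast hcc)
      simp only [hnb, Bool.and_false, Bool.false_and, Bool.false_eq_true, if_false]
      split_ifs with h1 h2
      · rfl
      · rfl
      · exact absurd (by rw [bne_iff_ne, hcount]; exact hcnt) h2

-- ===== VERDICT (by name: the statement is the Claim_ definition above) =====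
theorem normalized_email_py_spec : Claim_equal_normalized_email_py := by
  intro value _
  unfold Spec_normalized_email_py normalized_email_py normalized_email_py_alt pyText
  cases value <;> exact core_eq _
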